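-- pv_equiv track=rewrite | github.com/Lt-kang/Coding_test | 프로그래머스/lv0/120869. 외계어 사전/외계어 사전.py | solution
-- ===== SOURCE A (Python) =====
-- from collections import deque
--
-- def solution(s, d):
--     d = deque(d)
--     for w in s:
--         for _ in range(len(d)):
--             t = d.popleft()
--             if w in t:
--                 d.append(t)
--
--     return 1 if d else 2
-- ===== SOURCE B (Python) =====
-- def solution(s, d):
--     for t in d:
--         if all(w in t for w in s):
--             return 1
--     return 2
-- ===== Notes on version B (the rewrite author's own statement) =====
-- stated objective: simpler
-- what changed: A repeatedly filters a maintained candidate deque of dictionary words once per spell character; B inverts the loops, testing each word independently with all() and returning 1 at the first word containing every spell character, with no deque.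
import Mathlib
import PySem

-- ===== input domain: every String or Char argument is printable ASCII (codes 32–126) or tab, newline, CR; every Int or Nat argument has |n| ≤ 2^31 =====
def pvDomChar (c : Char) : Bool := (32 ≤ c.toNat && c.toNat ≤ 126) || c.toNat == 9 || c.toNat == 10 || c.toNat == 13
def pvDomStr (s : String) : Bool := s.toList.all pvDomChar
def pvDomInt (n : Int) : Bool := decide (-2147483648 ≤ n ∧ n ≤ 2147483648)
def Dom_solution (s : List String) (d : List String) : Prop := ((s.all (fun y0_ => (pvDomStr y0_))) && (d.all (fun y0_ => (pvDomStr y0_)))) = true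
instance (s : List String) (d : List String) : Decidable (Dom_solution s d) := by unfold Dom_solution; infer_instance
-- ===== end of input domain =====

-- B replaces A's per-character filtering of a candidate deque by an independent
-- word-outer / char-inner all() test with early return: simpler, no maintained deque.

-- ===== PORT A =====
-- inner 'for _ in range(len(d)): t = d.popleft(); if w in t: d.append(t)'
def pyPassA (w : String) : Nat → List String → List String
  | 0, dq => dq
  | _ + 1, [] => []
  | n + 1, t :: rest => pyPassA w n (if PySem.Str.isIn w t then rest ++ [t] else rest)

def solution (s : List String) (d : List String) : Int :=
  let d' := s.foldl (fun dq w => pyPassA w dq.length dq) d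
  match d' with
  | [] => 2
  | _ :: _ => 1

-- ===== PORT B =====
-- 'for t in d: if all(w in t for w in s): return 1' then 'return 2'
def altLoop (s : List String) : List String → Int
  | [] => 2
  | t :: rest => if s.all (fun w => PySem.Str.isIn w t) then 1 else altLoop s rest

def solution_alt (s : List String) (d : List String) : Int := altLoop s d

-- ===== PRECONDITION & SPEC =====
def Spec_solution (s : List String) (d : List String) (out : Int) : Prop := out = solution_alt s d
instance (s : List String) (d : List String) (out : Int) : Decidable (Spec_solution s d out) := by unfold Spec_solution; infer_instance

-- ===== CLAIM (what is proved, stated in full; the proofs are below) =====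
def Claim_equal_solution : Prop := ∀ (s : List String) (d : List String), Dom_solution s d → Spec_solution s d (solution s d)

-- ===== LEMMAS AND PROOFS =====

-- one deque pass is a stable filter
theorem pyPassA_eq_filter (w : String) : ∀ (xs ys : List String),
    pyPassA w xs.length (xs ++ ys) = ys ++ xs.filter (fun t => PySem.Str.isIn w t) := by
  intro xs
  induction xs with
  | nil => intro ys; simp [pyPassA]
  | cons t rest ih =>
    intro ys
    by_cases h : PySem.Chars.isIn w.toList t.toList = true
    · simpa [pyPassA, PySem.Str.isIn, h, List.append_assoc] using ih (ys ++ [t])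
    · simpa [pyPassA, PySem.Str.isIn, h] using ih ys

theorem foldl_filter_eq (s : List String) : ∀ (d : List String),
    s.foldl (fun dq w => pyPassA w dq.length dq) d
      = d.filter (fun t => s.all (fun w => PySem.Str.isIn w t)) := by
  induction s with
  | nil => intro d; simp
  | cons w rest ih =>
    intro d
    have h1 : pyPassA w d.length d = d.filter (fun t => PySem.Str.isIn w t) := by
      simpa using pyPassA_eq_filter w d []
    simp only [List.foldl_cons, h1, ih, List.filter_filter, List.all_cons, Bool.and_comm]

theorem altLoop_eq_filter (s : List String) : ∀ (d : List String),
    altLoop s d = (match d.filter (fun t => s.all (fun w => PySem.Str.isIn w t)) with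
                   | [] => (2 : Int) | _ :: _ => 1) := by
  intro d
  induction d with
  | nil => simp [altLoop]
  | cons t rest ih =>
    by_cases h : (s.all fun w => PySem.Str.isIn w t) = true
    · simp only [altLoop, List.filter_cons, h, if_true]
    · have h' : (s.all fun w => PySem.Str.isIn w t) = false := eq_false_of_ne_true h
      simp only [altLoop, List.filter_cons, h', Bool.false_eq_true, if_false]
      exact ih

-- ===== VERDICT (by name: the statement is the Claim_ definition above) =====
theorem solution_spec : Claim_equal_solution := by
  intro s d _
  unfold Spec_solution solution solution_alt
  rw [foldl_filter_eq, altLoop_eq_filter]
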